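-- pv_equiv track=rewrite | github.com/calvar/semillero_videojuegos | code/mmFunct.py | nextConfig
-- ===== SOURCE A (Python) =====
-- def nextConfig(config, symb):
--     """Recieve a configuration and return a list with all the
--     possible configurations in the next move using symbol symb"""
--     available = []
--     for i in range(3):
--         for j in range(3):
--             if config[i][j] == '-':
--                 available.append([i,j])
--     newConf = []
--     for a in available:
--         nc = [[],[],[]]
--         for i in range(3):
--             nc[i] = [j for j in config[i]]
--         nc[a[0]][a[1]] = symb
--         newConf.append(nc)
--     return newConf
-- ===== SOURCE B (Python) =====
-- def nextConfig(config, symb):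
--     """Recieve a configuration and return a list with all the
--     possible configurations in the next move using symbol symb"""
--     def row_opts(row, j):
--         # successor versions of one row: '-' among the first 3 cells replaced by symb
--         if j == 3:
--             return []
--         rest = row_opts(row, j + 1)
--         if row[j] == '-':
--             nr = list(row)
--             nr[j] = symb
--             return [nr] + rest
--         return rest
--
--     def go(rows, k):
--         # divide and conquer on the rows: moves in the head row, then moves in the tail
--         if k == 0:
--             return []
--         head, tail = rows[0], rows[1:]
--         here = [[nr] + [list(r) for r in tail] for nr in row_opts(head, 0)]
--         there = [[list(head)] + b for b in go(tail, k - 1)]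
--         return here + there
--
--     return go(config[:3], 3)
-- ===== Notes on version B (the rewrite author's own statement) =====
-- stated objective: alternative
-- what changed: A's two staged passes (collect a row-major index list of free cells, then rebuild each board by mutating a fresh copy per index) are replaced by structural divide-and-conquer recursion on the rows: successors placing in the head row (a recursion over its first 3 cells) are prepended to copied tails, then the head is prepended to the recursively computed successors of the tail; no index list is ever built.
import Mathlib
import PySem

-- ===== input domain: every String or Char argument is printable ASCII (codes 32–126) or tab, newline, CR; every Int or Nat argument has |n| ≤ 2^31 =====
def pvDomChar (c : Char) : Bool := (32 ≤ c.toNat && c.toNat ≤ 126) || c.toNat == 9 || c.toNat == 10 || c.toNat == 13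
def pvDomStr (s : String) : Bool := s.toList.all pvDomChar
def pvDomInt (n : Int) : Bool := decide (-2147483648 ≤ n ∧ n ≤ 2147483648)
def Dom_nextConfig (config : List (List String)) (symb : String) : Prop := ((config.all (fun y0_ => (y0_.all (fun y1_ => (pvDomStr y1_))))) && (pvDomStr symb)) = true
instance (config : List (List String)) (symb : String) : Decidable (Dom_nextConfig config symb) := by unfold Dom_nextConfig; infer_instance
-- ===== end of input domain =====

-- B replaces A's two staged passes (collect a row-major index list of free cells, then rebuild each
-- board by mutating a fresh copy per index) with structural divide-and-conquer recursion on the rows.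

-- ===== PORT A =====
-- list assignment xs[i] = v; exact for 0 ≤ i < len, the only assignments A reaches inside Pre_ (i ∈ {0,1,2}, rows of length ≥ 3)
def pvListSet {α : Type} (xs : List α) (i : Int) (v : α) : List α :=
  xs.set i.toNat v

def nextConfig (config : List (List String)) (symb : String) : List (List (List String)) :=
  -- available = []; for i in range(3): for j in range(3): if config[i][j] == '-': available.append([i,j])
  let available : List (Int × Int) :=
    (PySem.List.pyRange 0 3 1).foldl (fun acc i =>
      (PySem.List.pyRange 0 3 1).foldl (fun acc j =>
        if (PySem.List.pyGet? ((PySem.List.pyGet? config i).getD []) j).getD "" == "-"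
        then acc ++ [(i, j)] else acc) acc) []
  -- newConf = []; for a in available: …
  available.foldl (fun newConf a =>
    let nc : List (List String) := [[], [], []]
    -- for i in range(3): nc[i] = [j for j in config[i]]
    let nc := (PySem.List.pyRange 0 3 1).foldl (fun nc i =>
      pvListSet nc i (((PySem.List.pyGet? config i).getD []).map (fun j => j))) nc
    -- nc[a[0]][a[1]] = symb
    let nc := pvListSet nc a.1 (pvListSet ((PySem.List.pyGet? nc a.1).getD []) a.2 symb)
    newConf ++ [nc]) []

-- ===== PORT B =====
-- row_opts(row, j): recursion over the first 3 cells of one row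
def pvRowOpts (symb : String) (row : List String) (j : Nat) : List (List String) :=
  -- 'if j == 3: return []' — the guard 'j < 3' is the same stop, since j only ascends from 0
  if j < 3 then
    let rest := pvRowOpts symb row (j + 1)
    -- row[j] read succeeds inside Pre_ (rows of length ≥ 3); nr = list(row); nr[j] = symb
    if row.getD j "" == "-" then (row.set j symb) :: rest else rest
  else []
termination_by 3 - j

-- go(rows, k): moves in the head row, then moves in the tail
def pvGo (symb : String) (rows : List (List String)) (k : Nat) : List (List (List String)) :=
  match k with
  | 0 => []
  | k + 1 =>
    -- head, tail = rows[0], rows[1:]; rows[0] succeeds inside Pre_ (≥ 3 rows)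
    let head := rows.getD 0 []
    let tail := rows.drop 1
    let here := (pvRowOpts symb head 0).map (fun nr => nr :: tail.map (fun r => r.map (fun x => x)))
    let there := (pvGo symb tail k).map (fun b => (head.map (fun x => x)) :: b)
    here ++ there

def nextConfig_alt (config : List (List String)) (symb : String) : List (List (List String)) :=
  pvGo symb (config.take 3) 3

-- ===== PRECONDITION & SPEC =====
-- Pre_ admits exactly the inputs where A's config[i][j] reads (i, j < 3) succeed; elsewhere A raises IndexError.
def Pre_nextConfig (config : List (List String)) (symb : String) : Prop :=
  3 ≤ config.length ∧ ∀ i < 3, 3 ≤ (config.getD i []).length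
instance (config : List (List String)) (symb : String) : Decidable (Pre_nextConfig config symb) := by
  unfold Pre_nextConfig; infer_instance
def pvWitness_nextConfig : List (List String) × String :=
  ([["-", "x", "o"], ["o", "-", "x"], ["x", "o", "-"]], "x")

def Spec_nextConfig (config : List (List String)) (symb : String) (out : List (List (List String))) : Prop := out = nextConfig_alt config symb
instance (config : List (List String)) (symb : String) (out : List (List (List String))) : Decidable (Spec_nextConfig config symb out) := by unfold Spec_nextConfig; infer_instance

-- ===== CLAIM (what is proved, stated in full; the proofs are below) =====
def Claim_equal_nextConfig : Prop := ∀ (config : List (List String)) (symb : String), Dom_nextConfig config symb → Pre_nextConfig config symb → Spec_nextConfig config symb (nextConfig config symb)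

-- ===== LEMMAS AND PROOFS =====
theorem flatMap_singleton_map {α β : Type} (l : List α) (f : α → β) :
    (l.flatMap fun x => [f x]) = l.map f := by
  induction l with
  | nil => rfl
  | cons a t ih => simp [List.flatMap_cons, ih]
theorem pyget_one {α : Type} (x y : α) (t : List α) : PySem.List.pyGet? (x :: y :: t) (1 : Int) = some y := by
  have h : (0 : Int) ≤ (t.length : Int) := by positivity
  simp [PySem.List.pyGet?, PySem.List.pyIdx?, h]
theorem pyget_two {α : Type} (x y z : α) (t : List α) : PySem.List.pyGet? (x :: y :: z :: t) (2 : Int) = some z := by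
  have h : (2 : Int) ≤ (t.length : Int) + 1 + 1 := by omega
  simp [PySem.List.pyGet?, PySem.List.pyIdx?, h]
theorem rowOpts_cons (symb x0 x1 x2 : String) (t : List String) :
    pvRowOpts symb (x0 :: x1 :: x2 :: t) 0 =
      (if x0 == "-" then [symb :: x1 :: x2 :: t] else []) ++
      (if x1 == "-" then [x0 :: symb :: x2 :: t] else []) ++
      (if x2 == "-" then [x0 :: x1 :: symb :: t] else []) := by
  unfold pvRowOpts pvRowOpts pvRowOpts pvRowOpts
  split_ifs <;> simp_all [List.set]
theorem filter_map_3 {β : Type} (p : Int → Bool) (F : Int → β) :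
    ((([0, 1, 2] : List Int).filter p).map F) =
      (if p 0 then [F 0] else []) ++ (if p 1 then [F 1] else []) ++ (if p 2 then [F 2] else []) := by
  cases h0 : p 0 <;> cases h1 : p 1 <;> cases h2 : p 2 <;> simp [List.filter, h0, h1, h2]

-- ===== VERDICT (by name: the statement is the Claim_ definition above) =====
set_option maxHeartbeats 4000000 in
theorem nextConfig_spec : Claim_equal_nextConfig := by
  intro config symb _ hpre
  unfold Spec_nextConfig
  obtain ⟨hlen, hrows⟩ := hpre
  match config, hlen with
  | r0 :: r1 :: r2 :: rest, _ =>
    have h0 := hrows 0 (by omega)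
    have h1 := hrows 1 (by omega)
    have h2 := hrows 2 (by omega)
    simp only [List.getD, List.getElem?_cons_zero, List.getElem?_cons_succ, Option.getD_some] at h0 h1 h2
    match r0, h0 with
    | a0 :: a1 :: a2 :: t0, _ =>
    match r1, h1 with
    | b0 :: b1 :: b2 :: t1, _ =>
    match r2, h2 with
    | c0 :: c1 :: c2 :: t2, _ =>
      have hr : PySem.List.pyRange 0 3 1 = [0, 1, 2] := by decide
      simp only [nextConfig, nextConfig_alt, hr,
        PySem.List.foldl_append_if, PySem.List.foldl_append_eq_flatMap,
        List.flatMap_cons, List.flatMap_nil,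
        List.flatMap_append, List.flatMap_map, flatMap_singleton_map,
        List.nil_append, List.append_nil]
      simp only [pvGo, List.take_succ_cons, List.take_zero, List.drop_succ_cons, List.drop_zero,
        List.getD_cons_zero, rowOpts_cons, filter_map_3]
      simp [pvListSet, pyget_one, pyget_two, List.foldl, List.set,
        apply_ite (List.map (fun nr => nr :: [b0 :: b1 :: b2 :: t1, c0 :: c1 :: c2 :: t2])),
        List.append_assoc]
      split_ifs <;> simp
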